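-- pv_equiv track=rewrite | github.com/Kim-Minhee/Baekjoon | 백준/Bronze/1975. Number Game/Number Game.py | f
-- ===== SOURCE A (Python) =====
-- def f(n):
--   r = 0
--   for i in range(2, n+1):
--     t = n
--     while t%i==0:
--       r += 1
--       t //= i
--   return r
-- ===== SOURCE B (Python) =====
-- def _vexp(n, d):
--     c = 0
--     while n % d == 0:
--         c += 1
--         n //= d
--     return c
--
-- def f(n):
--     if n < 2:
--         return 0
--     total = 1  # the divisor n itself is counted once
--     i = 2
--     while i * i <= n:
--         if n % i == 0:
--             total += _vexp(n, i)
--             j = n // i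
--             if j != i:
--                 total += _vexp(n, j)
--         i += 1
--     return total
-- ===== Notes on version B (the rewrite author's own statement) =====
-- stated objective: faster
-- what changed: Instead of scanning every i in [2,n], B enumerates only divisors via trial division up to sqrt(n), adding the exponent of each small divisor and of its complementary large divisor n//i, and counting the divisor n itself once.
import Mathlib
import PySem

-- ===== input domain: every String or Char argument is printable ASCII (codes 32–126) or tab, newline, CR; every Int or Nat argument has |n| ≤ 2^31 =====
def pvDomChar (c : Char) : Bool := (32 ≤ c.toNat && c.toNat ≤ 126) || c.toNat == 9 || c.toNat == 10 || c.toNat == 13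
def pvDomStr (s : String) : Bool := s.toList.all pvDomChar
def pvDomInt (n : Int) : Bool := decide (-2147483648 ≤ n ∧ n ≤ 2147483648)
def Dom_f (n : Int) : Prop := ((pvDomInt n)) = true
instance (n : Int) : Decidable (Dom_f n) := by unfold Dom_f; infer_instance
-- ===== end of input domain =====

-- B replaces A's scan of every i in [2,n] by trial division up to sqrt(n), counting the
-- exponent of each small divisor and of its complementary large divisor n//i (objective: faster).

-- ===== PORT A =====
-- inner 'while t % i == 0: r += 1; t //= i' of A (same loop is B's helper _vexp);
-- the guards 0 < t and 2 ≤ i only make the recursion total and always hold at call sites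
def pvVC (i : Nat) (t : Nat) : Nat :=
  if h : t % i = 0 ∧ 0 < t ∧ 2 ≤ i then pvVC i (t / i) + 1 else 0
termination_by t
decreasing_by exact Nat.div_lt_self h.2.1 (by omega)

def f (n : Int) : Int :=
  (PySem.List.pyRange 2 (n + 1) 1).foldl (fun r i => r + (pvVC i.toNat n.toNat : Int)) 0

-- ===== PORT B =====
-- 'while i*i <= n' loop of Source B, over N = n.toNat
def pvLoop (N : Nat) (i : Nat) (r : Nat) : Nat :=
  if i * i ≤ N then
    pvLoop N (i + 1)
      (if N % i = 0 then
        (if N / i ≠ i then r + pvVC i N + pvVC (N / i) N else r + pvVC i N)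
       else r)
  else r
termination_by N + 1 - i
decreasing_by
  rcases Nat.eq_zero_or_pos i with h0 | h0
  · omega
  · have : i ≤ i * i := Nat.le_mul_of_pos_left i h0
    omega

def f_alt (n : Int) : Int :=
  if n < 2 then 0 else ((pvLoop n.toNat 2 1 : Nat) : Int)

-- ===== PRECONDITION & SPEC =====
def Spec_f (n : Int) (out : Int) : Prop := out = f_alt n
instance (n : Int) (out : Int) : Decidable (Spec_f n out) := by unfold Spec_f; infer_instance

-- ===== CLAIM (what is proved, stated in full; the proofs are below) =====
def Claim_equal_f : Prop := ∀ (n : Int), Dom_f n → Spec_f n (f n)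

-- ===== LEMMAS AND PROOFS =====

-- divisors of N that are ≥ 2
def pvD (N : Nat) : Finset Nat := N.divisors.filter (fun d => 2 ≤ d)

lemma pvVC_eq_zero (i t : Nat) (h : ¬ t % i = 0) : pvVC i t = 0 := by
  rw [pvVC, dif_neg]; tauto

lemma pvVC_self (N : Nat) (hN : 2 ≤ N) : pvVC N N = 1 := by
  rw [pvVC, dif_pos ⟨Nat.mod_self N, by omega, hN⟩, Nat.div_self (by omega)]
  rw [pvVC, dif_neg]
  simp [Nat.mod_eq_of_lt (show 1 < N by omega)]

lemma sum_map_range (g : Nat → Int) (K : Nat) :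
    ((List.range K).map g).sum = ∑ k ∈ Finset.range K, g k := by
  induction K with
  | zero => simp
  | succ K ih => rw [List.range_succ, List.map_append, List.sum_append, Finset.sum_range_succ, ih]; simp

lemma mem_pvD (N d : Nat) : d ∈ pvD N ↔ d ∣ N ∧ N ≠ 0 ∧ 2 ≤ d := by
  simp [pvD, Nat.mem_divisors]; tauto

-- A's total as a divisor sum
lemma A_sum (n : Int) (hn : 2 ≤ n) :
    f n = ((∑ d ∈ pvD n.toNat, pvVC d n.toNat : Nat) : Int) := by
  have hN : 2 ≤ n.toNat := by omega
  rw [f, PySem.List.foldl_add, PySem.List.pyRange_one, List.map_map, sum_map_range]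
  rw [show (n + 1 - 2).toNat = n.toNat + 1 - 2 by omega]
  have step1 : ∑ k ∈ Finset.range (n.toNat + 1 - 2),
      ((fun i : Int => ((pvVC i.toNat n.toNat : Nat) : Int)) ∘ (fun k : Nat => (2 : Int) + ↑k)) k
      = ∑ k ∈ Finset.range (n.toNat + 1 - 2), ((pvVC (2 + k) n.toNat : Nat) : Int) := by
    apply Finset.sum_congr rfl
    intro k _
    simp only [Function.comp_apply]
    rw [show ((2 : Int) + (k : Int)).toNat = 2 + k from by omega]
  have step2 : ∑ d ∈ Finset.Ico 2 (n.toNat + 1), ((pvVC d n.toNat : Nat) : Int)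
      = ∑ k ∈ Finset.range (n.toNat + 1 - 2), ((pvVC (2 + k) n.toNat : Nat) : Int) :=
    Finset.sum_Ico_eq_sum_range _ 2 (n.toNat + 1)
  rw [step1, ← step2, Nat.cast_sum, zero_add]
  symm
  apply Finset.sum_subset
  · intro d hd
    rw [mem_pvD] at hd
    have hle : d ≤ n.toNat := Nat.le_of_dvd (by omega) hd.1
    rw [Finset.mem_Ico]
    omega
  · intro d hd hnd
    rw [Finset.mem_Ico] at hd
    rw [mem_pvD] at hnd
    have hndvd : ¬ d ∣ n.toNat := fun h => hnd ⟨h, by omega, hd.1⟩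
    rw [pvVC_eq_zero _ _ (fun h => hndvd (Nat.dvd_of_mod_eq_zero h))]
    simp

lemma filter_empty_of_big (N i : Nat) (h : N < i * i) :
    (pvD N).filter (fun d => i ≤ d ∧ i ≤ N / d) = ∅ := by
  ext d
  simp only [Finset.mem_filter, Finset.notMem_empty, iff_false, mem_pvD]
  rintro ⟨⟨hdvd, hN0, h2⟩, hid, hiNd⟩
  have h1 : i * i ≤ d * (N / d) := Nat.mul_le_mul hid hiNd
  have h2' : d * (N / d) = N := Nat.mul_div_cancel' hdvd
  omega

-- B's loop invariant
lemma loop_eq (N : Nat) (hN : 2 ≤ N) :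
    ∀ k i r, N + 1 - i ≤ k → 2 ≤ i →
      pvLoop N i r =
        r + ∑ d ∈ (pvD N).filter (fun d => i ≤ d ∧ i ≤ N / d), pvVC d N := by
  intro k
  induction k with
  | zero =>
    intro i r hk hi
    have hbig : N < i * i := by
      have : i ≤ i * i := Nat.le_mul_of_pos_left i (by omega)
      omega
    rw [pvLoop, if_neg (by omega), filter_empty_of_big N i hbig]
    simp
  | succ k ih =>
    intro i r hk hi
    by_cases hii : i * i ≤ N
    · have hiN : i ≤ N := le_trans (Nat.le_mul_of_pos_left i (by omega)) hii
      rw [pvLoop, if_pos hii, ih (i + 1) _ (by omega) (by omega)]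
      -- split the filter at the fiber min(d, N/d) = i
      have hmono : ∀ d ∈ pvD N, ((i ≤ d ∧ i ≤ N / d) ∧ (i + 1 ≤ d ∧ i + 1 ≤ N / d)) ↔ (i + 1 ≤ d ∧ i + 1 ≤ N / d) := by
        intro d _; constructor
        · rintro ⟨_, h⟩; exact h
        · intro h; exact ⟨⟨by omega, by omega⟩, h⟩
      have hsplit := Finset.sum_filter_add_sum_filter_not
        ((pvD N).filter (fun d => i ≤ d ∧ i ≤ N / d))
        (fun d => i + 1 ≤ d ∧ i + 1 ≤ N / d) (fun d => pvVC d N)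
      rw [Finset.filter_filter, Finset.filter_filter] at hsplit
      rw [Finset.filter_congr hmono] at hsplit
      -- fiber characterisation
      have hfibmem : ∀ d, (d ∈ (pvD N).filter (fun d => (i ≤ d ∧ i ≤ N / d) ∧ ¬(i + 1 ≤ d ∧ i + 1 ≤ N / d)))
          ↔ (d ∣ N ∧ 2 ≤ d ∧ (d = i ∨ N / d = i)) := by
        intro d
        rw [Finset.mem_filter, mem_pvD]
        constructor
        · rintro ⟨⟨hdvd, hN0, h2⟩, ⟨hid, hiNd⟩, hnot⟩
          refine ⟨hdvd, h2, ?_⟩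
          omega
        · rintro ⟨hdvd, h2, hcase⟩
          have hdN : d ≤ N := Nat.le_of_dvd (by omega) hdvd
          have hmul : d * (N / d) = N := Nat.mul_div_cancel' hdvd
          rcases hcase with hdi | hNdi
          · subst hdi
            have hile : d ≤ N / d := (Nat.le_div_iff_mul_le (by omega)).2 hii
            exact ⟨⟨hdvd, by omega, h2⟩, ⟨le_refl d, hile⟩, by omega⟩
          · have hge : i ≤ d := by
              by_contra hlt
              push Not at hlt
              have : d * (N / d) < i * i := by
                calc d * (N / d) = d * i := by rw [hNdi]
                _ < i * i := Nat.mul_lt_mul_of_lt_of_le hlt (le_refl i) (by omega)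
              omega
            exact ⟨⟨hdvd, by omega, h2⟩, ⟨hge, by omega⟩, by omega⟩
      by_cases hmod : N % i = 0
      · have hdvd : i ∣ N := Nat.dvd_of_mod_eq_zero hmod
        have hile : i ≤ N / i := (Nat.le_div_iff_mul_le (by omega)).2 hii
        have hNddvd : N / i ∣ N := Nat.div_dvd_of_dvd hdvd
        have hNdd : N / (N / i) = i := Nat.div_div_self hdvd (by omega)
        have huniq : ∀ d, d ∣ N → N / d = i → d = N / i := by
          intro d hd hNdi
          have := Nat.div_div_self hd (show N ≠ 0 by omega)
          rw [hNdi] at this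
          omega
        by_cases hji : N / i ≠ i
        · -- fiber = {i, N/i}
          have hfib : (pvD N).filter (fun d => (i ≤ d ∧ i ≤ N / d) ∧ ¬(i + 1 ≤ d ∧ i + 1 ≤ N / d)) = {i, N / i} := by
            ext d
            rw [hfibmem d, Finset.mem_insert, Finset.mem_singleton]
            constructor
            · rintro ⟨hd, h2, hdi | hNdi⟩
              · exact Or.inl hdi
              · exact Or.inr (huniq d hd hNdi)
            · rintro (rfl | rfl)
              · exact ⟨hdvd, hi, Or.inl rfl⟩
              · exact ⟨hNddvd, by omega, Or.inr hNdd⟩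
          rw [hfib] at hsplit
          rw [Finset.sum_insert (by simp; omega), Finset.sum_singleton] at hsplit
          rw [if_pos hmod, if_pos hji]
          omega
        · -- N / i = i, fiber = {i}
          push Not at hji
          have hfib : (pvD N).filter (fun d => (i ≤ d ∧ i ≤ N / d) ∧ ¬(i + 1 ≤ d ∧ i + 1 ≤ N / d)) = {i} := by
            ext d
            rw [hfibmem d, Finset.mem_singleton]
            constructor
            · rintro ⟨hd, h2, hdi | hNdi⟩
              · exact hdi
              · have := huniq d hd hNdi; omega
            · rintro rfl
              exact ⟨hdvd, hi, Or.inl rfl⟩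
          rw [hfib, Finset.sum_singleton] at hsplit
          rw [if_pos hmod, if_neg (by omega)]
          omega
      · -- i does not divide N: fiber empty
        have hfib : (pvD N).filter (fun d => (i ≤ d ∧ i ≤ N / d) ∧ ¬(i + 1 ≤ d ∧ i + 1 ≤ N / d)) = ∅ := by
          ext d
          rw [hfibmem d]
          simp only [Finset.notMem_empty, iff_false]
          rintro ⟨hd, h2, hdi | hNdi⟩
          · subst hdi; exact hmod (Nat.mod_eq_zero_of_dvd hd)
          · exact hmod (Nat.mod_eq_zero_of_dvd (hNdi ▸ Nat.div_dvd_of_dvd hd))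
        rw [hfib, Finset.sum_empty] at hsplit
        rw [if_neg hmod]
        omega
    · rw [pvLoop, if_neg hii, filter_empty_of_big N i (by omega)]
      simp

lemma B_sum (n : Int) (hn : 2 ≤ n) :
    f_alt n = ((∑ d ∈ pvD n.toNat, pvVC d n.toNat : Nat) : Int) := by
  have hN : 2 ≤ n.toNat := by omega
  rw [f_alt, if_neg (by omega)]
  rw [loop_eq n.toNat hN (n.toNat + 1 - 2) 2 1 (by omega) (by omega)]
  have hsplit := Finset.sum_filter_add_sum_filter_not (pvD n.toNat)
    (fun d => 2 ≤ d ∧ 2 ≤ n.toNat / d) (fun d => pvVC d n.toNat)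
  have hfib : (pvD n.toNat).filter (fun d => ¬(2 ≤ d ∧ 2 ≤ n.toNat / d)) = {n.toNat} := by
    ext d
    rw [Finset.mem_filter, mem_pvD, Finset.mem_singleton]
    constructor
    · rintro ⟨⟨hdvd, hN0, h2⟩, hnot⟩
      have hdN : d ≤ n.toNat := Nat.le_of_dvd (by omega) hdvd
      have h1 : 1 ≤ n.toNat / d := (Nat.le_div_iff_mul_le (by omega)).2 (by omega)
      have hd1 : n.toNat / d ≤ 1 := by
        by_contra hgt
        push Not at hgt
        exact hnot ⟨h2, by omega⟩
      have heq1 : n.toNat / d = 1 := by omega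
      have hmul : d * (n.toNat / d) = n.toNat := Nat.mul_div_cancel' hdvd
      rw [heq1, mul_one] at hmul
      exact hmul
    · rintro rfl
      refine ⟨⟨dvd_refl n.toNat, by omega, hN⟩, ?_⟩
      rw [Nat.div_self (by omega)]
      omega
  rw [hfib, Finset.sum_singleton, pvVC_self n.toNat hN] at hsplit
  omega

-- ===== VERDICT (by name: the statement is the Claim_ definition above) =====
theorem f_spec : Claim_equal_f := by
  intro n _
  unfold Spec_f
  by_cases hn : n < 2
  · have : n + 1 ≤ 2 := by omega
    simp [f, f_alt, PySem.List.pyRange_one_eq_nil this, hn]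
  · push Not at hn
    rw [A_sum n hn, B_sum n hn]
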